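-- pv_equiv track=rewrite | github.com/DoRenato/gerador_campeonato | pts_corridos.py | validar_times_rodada
-- ===== SOURCE A (Python) =====
-- def validar_times_rodada(confronto_atual, lista_rodada_atual):
--     if len(lista_rodada_atual)>0:
--         for time in confronto_atual:
--             for confronto in lista_rodada_atual:
--                 if time in confronto:
--                     return False
--                 else:
--                     continue
--     return True
-- ===== SOURCE B (Python) =====
-- def validar_times_rodada(confronto_atual, lista_rodada_atual):
--     scheduled = set()
--     for confronto in lista_rodada_atual:
--         scheduled.update(confronto)
--     return not (set(confronto_atual) & scheduled)
-- ===== Notes on version B (the rewrite author's own statement) =====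
-- stated objective: idiomatic
-- what changed: Builds a set index of all scheduled teams in one pass and answers with a single set-intersection emptiness test, instead of A's nested team-by-team scan with early return; the redundant len()>0 guard is dropped.
import Mathlib
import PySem

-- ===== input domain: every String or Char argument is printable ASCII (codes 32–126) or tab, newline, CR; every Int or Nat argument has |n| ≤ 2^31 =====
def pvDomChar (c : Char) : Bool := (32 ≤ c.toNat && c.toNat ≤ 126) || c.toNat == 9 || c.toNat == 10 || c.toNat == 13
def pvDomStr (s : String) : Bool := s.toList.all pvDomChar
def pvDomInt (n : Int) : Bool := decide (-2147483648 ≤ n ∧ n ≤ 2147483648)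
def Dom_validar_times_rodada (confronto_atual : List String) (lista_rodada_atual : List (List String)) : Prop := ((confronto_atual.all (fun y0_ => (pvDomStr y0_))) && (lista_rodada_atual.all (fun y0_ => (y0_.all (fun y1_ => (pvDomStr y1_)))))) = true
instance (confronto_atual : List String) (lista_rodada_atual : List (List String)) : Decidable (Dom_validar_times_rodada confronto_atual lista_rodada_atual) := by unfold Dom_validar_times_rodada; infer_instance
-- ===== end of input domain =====

-- B builds a set index of scheduled teams once and tests set intersection, replacing A's nested scan (objective: idiomatic).

-- ===== PORT A =====
-- inner loop 'for confronto in lista_rodada_atual: if time in confronto: return False' (some = early return)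
def vtInnerA (time : String) : List (List String) → Option Bool
  | [] => none
  | confronto :: rest => if time ∈ confronto then some false else vtInnerA time rest

-- outer loop 'for time in confronto_atual: …'
def vtOuterA : List String → List (List String) → Option Bool
  | [], _ => none
  | time :: rest, lista =>
      match vtInnerA time lista with
      | some b => some b
      | none => vtOuterA rest lista

def validar_times_rodada (confronto_atual : List String) (lista_rodada_atual : List (List String)) : Bool :=
  if lista_rodada_atual.length > 0 then
    (vtOuterA confronto_atual lista_rodada_atual).getD true
  else true

-- ===== PORT B =====
def validar_times_rodada_alt (confronto_atual : List String) (lista_rodada_atual : List (List String)) : Bool :=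
  let scheduled : PySem.Set String :=
    lista_rodada_atual.foldl (fun s confronto => PySem.Set.update s confronto) PySem.Set.empty
  (PySem.Set.inter (PySem.Set.ofList confronto_atual) scheduled).isEmpty

-- ===== PRECONDITION & SPEC =====
def Spec_validar_times_rodada (confronto_atual : List String) (lista_rodada_atual : List (List String)) (out : Bool) : Prop := out = validar_times_rodada_alt confronto_atual lista_rodada_atual
instance (confronto_atual : List String) (lista_rodada_atual : List (List String)) (out : Bool) : Decidable (Spec_validar_times_rodada confronto_atual lista_rodada_atual out) := by unfold Spec_validar_times_rodada; infer_instance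

-- ===== CLAIM (what is proved, stated in full; the proofs are below) =====
def Claim_equal_validar_times_rodada : Prop := ∀ (confronto_atual : List String) (lista_rodada_atual : List (List String)), Dom_validar_times_rodada confronto_atual lista_rodada_atual → Spec_validar_times_rodada confronto_atual lista_rodada_atual (validar_times_rodada confronto_atual lista_rodada_atual)

-- ===== LEMMAS AND PROOFS =====

theorem vtInnerA_eq (t : String) (l : List (List String)) :
    vtInnerA t l = if l.any (fun c => t ∈ c) then some false else none := by
  induction l with
  | nil => rfl
  | cons c rest ih =>
      simp only [vtInnerA, List.any_cons, ih]
      by_cases h : t ∈ c <;> simp [h]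

theorem vtOuterA_eq (ca : List String) (l : List (List String)) :
    vtOuterA ca l = if ca.any (fun t => l.any (fun c => t ∈ c)) then some false else none := by
  induction ca with
  | nil => rfl
  | cons t rest ih =>
      simp only [vtOuterA, vtInnerA_eq, List.any_cons, ih]
      by_cases h : l.any (fun c => t ∈ c) <;> simp [h]

theorem mem_foldl_update (y : String) (l : List (List String)) (s : PySem.Set String) :
    y ∈ l.foldl (fun s c => PySem.Set.update s c) s ↔ y ∈ s ∨ ∃ c ∈ l, y ∈ c := by
  induction l generalizing s with
  | nil => simp
  | cons c rest ih =>
      simp [List.foldl_cons, ih, PySem.Set.mem_update]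
      tauto

theorem A_true_iff (ca : List String) (l : List (List String)) :
    validar_times_rodada ca l = true ↔ ∀ t ∈ ca, ∀ c ∈ l, t ∉ c := by
  unfold validar_times_rodada
  rcases l with _ | ⟨c, rest⟩
  · simp
  · rw [if_pos (by simp)]
    rw [vtOuterA_eq]
    by_cases h : (ca.any (fun t => (c :: rest).any (fun c' => t ∈ c')) : Bool) = true
    · simp only [h, if_true, Option.getD_some]
      simp only [List.any_eq_true, decide_eq_true_eq] at h
      constructor
      · intro hfalse; exact absurd hfalse (by decide)
      · intro hall
        obtain ⟨t, ht, c', hc', hmem⟩ := h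
        exact absurd hmem (hall t ht c' hc')
    · rw [if_neg h]
      simp only [List.any_eq_true, decide_eq_true_eq, not_exists] at h
      constructor
      · intro _ t ht c' hc' hmem
        exact h t ⟨ht, c', hc', hmem⟩
      · intro _; rfl

theorem B_true_iff (ca : List String) (l : List (List String)) :
    validar_times_rodada_alt ca l = true ↔ ∀ t ∈ ca, ∀ c ∈ l, t ∉ c := by
  unfold validar_times_rodada_alt
  rw [List.isEmpty_iff, List.eq_nil_iff_forall_not_mem]
  constructor
  · intro h t ht c hc hmem
    exact h t (by
      rw [PySem.Set.mem_inter, PySem.Set.mem_ofList, mem_foldl_update]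
      exact ⟨ht, Or.inr ⟨c, hc, hmem⟩⟩)
  · intro h t ht
    rw [PySem.Set.mem_inter, PySem.Set.mem_ofList, mem_foldl_update] at ht
    rcases ht with ⟨h1, h2 | ⟨c, hc, hmem⟩⟩
    · simp [PySem.Set.empty] at h2
    · exact h t h1 c hc hmem

-- ===== VERDICT (by name: the statement is the Claim_ definition above) =====
theorem validar_times_rodada_spec : Claim_equal_validar_times_rodada := by
  intro ca l _
  unfold Spec_validar_times_rodada
  rw [Bool.eq_iff_iff, A_true_iff, B_true_iff]
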